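-- pv_equiv track=rewrite | github.com/peterlaxalt/robofont | extensions/MetricsMachine.roboFontExt/lib/mm4/objects/mmGroups.py | _findMaxRank
-- ===== SOURCE A (Python) =====
-- def _findMaxRank(pairs, leftRankings, rightRankings):
--     """
--     >>> font = _setupTestFont3()
--     >>> groups = font.groups.metricsMachine.mutableCopy()
--     >>> pairs = {
--     ...     ("A", "H") : dict(value=0),
--     ...     ("A", "B") : dict(value=0),
--     ...     ("A", "H.alt") : dict(value=0),
--     ...     ("Aacute", "H") : dict(value=0),
--     ...     ("Aacute", "B") : dict(value=0),
--     ...     ("Aacute", "H.alt") : dict(value=0),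
--     ...     ("Atilde", "H") : dict(value=0),
--     ...     ("Atilde", "B") : dict(value=0),
--     ...     ("Atilde", "H.alt") : dict(value=0),
--     ... }
--     >>> leftRankings = {
--     ...     "A" : 4,
--     ...     "Aacute" : 0,
--     ...     "Atilde" : -1
--     ... }
--     >>> rightRankings = {
--     ...     "H" : 4,
--     ...     "B" : 4,
--     ...     "H.alt" : -1
--     ... }
--     >>> groups.metricsMachine._findMaxRank(pairs, leftRankings, rightRankings)
--     ('A', 'H')
--     """
--     values = {}
--     for (left, right), data in pairs.items():
--         leftRank = leftRankings[left]
--         rightRank = rightRankings[right]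
--         value = leftRank * rightRank
--         if value not in values:
--             values[value] = []
--         values[value].append((leftRank, rightRank, abs(data["value"]), (left, right)))
--     maxValue = max(values.keys())
--     maxPairs = values[maxValue]
--     # use the highest possible kerning value
--     finalPair = max(maxPairs)[-1]
--     return finalPair
-- ===== SOURCE B (Python) =====
-- def _findMaxRank(pairs, leftRankings, rightRankings):
--     # Single pass: keep the best composite key (product, leftRank, rightRank, |value|, pair);
--     # no intermediate grouping dict.
--     best = None
--     for (left, right), data in pairs.items():
--         leftRank = leftRankings[left]
--         rightRank = rightRankings[right]
--         key = (leftRank * rightRank, leftRank, rightRank, abs(data["value"]), (left, right))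
--         if best is None or key > best:
--             best = key
--     return best[-1]
-- ===== Notes on version B (the rewrite author's own statement) =====
-- stated objective: simpler
-- what changed: Replaces A's two-stage selection (bucket pairs by rank product in a dict, max over keys, then max inside the winning bucket) by one fold that keeps the single best composite tuple (product, leftRank, rightRank, |value|, pair).
import Mathlib
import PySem

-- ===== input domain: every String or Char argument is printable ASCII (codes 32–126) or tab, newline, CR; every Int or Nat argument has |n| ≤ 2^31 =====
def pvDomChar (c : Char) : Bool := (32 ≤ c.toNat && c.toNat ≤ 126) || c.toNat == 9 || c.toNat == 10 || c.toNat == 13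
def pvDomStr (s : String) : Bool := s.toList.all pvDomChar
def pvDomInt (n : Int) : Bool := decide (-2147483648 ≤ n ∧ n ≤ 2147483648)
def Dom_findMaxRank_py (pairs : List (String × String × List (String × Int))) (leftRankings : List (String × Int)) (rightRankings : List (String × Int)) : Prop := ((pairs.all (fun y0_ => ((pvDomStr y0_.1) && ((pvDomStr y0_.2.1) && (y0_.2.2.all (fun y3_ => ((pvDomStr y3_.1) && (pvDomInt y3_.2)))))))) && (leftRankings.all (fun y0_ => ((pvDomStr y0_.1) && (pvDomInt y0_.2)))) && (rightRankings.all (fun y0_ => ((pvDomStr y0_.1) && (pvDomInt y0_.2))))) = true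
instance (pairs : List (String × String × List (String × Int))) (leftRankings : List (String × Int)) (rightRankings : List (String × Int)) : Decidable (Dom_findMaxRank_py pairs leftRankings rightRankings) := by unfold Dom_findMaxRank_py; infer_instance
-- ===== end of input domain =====

-- B replaces A's bucket-by-product dict plus two-stage max by a single fold keeping the best
-- composite tuple (product, leftRank, rightRank, |value|, pair); same return value, no speed claim.


-- shared primitive: d[k] with default 0 (Pre_ guarantees the key is present, Python raises KeyError otherwise)
def pvLookD (m : List (String × Int)) (k : String) : Int := (List.lookup k m).getD 0

-- Python tuple/string '<' : lexicographic on code points, modelled by nested Prod.Lex over List Char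
def pvEnc2 (p : String × String) : Lex ((List Char) × (List Char)) := toLex (p.1.toList, p.2.toList)
def pvEnc4 (t : Int × Int × Int × (String × String)) : Lex (Int × Lex (Int × Lex (Int × Lex ((List Char) × (List Char))))) :=
  toLex (t.1, toLex (t.2.1, toLex (t.2.2.1, pvEnc2 t.2.2.2)))
def pvEnc5 (k : Int × Int × Int × Int × (String × String)) : Lex (Int × Lex (Int × Lex (Int × Lex (Int × Lex ((List Char) × (List Char)))))) :=
  toLex (k.1, pvEnc4 k.2)

-- ===== PORT A =====
def findMaxRank_py (pairs : List (String × String × List (String × Int))) (leftRankings : List (String × Int)) (rightRankings : List (String × Int)) : String × String :=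
  let values : PySem.Dict Int (List (Int × Int × Int × (String × String))) :=
    pairs.foldl (fun d p =>
      let leftRank := pvLookD leftRankings p.1
      let rightRank := pvLookD rightRankings p.2.1
      let value := leftRank * rightRank
      d.modify value [] (fun l => l ++ [(leftRank, rightRank, |pvLookD p.2.2 "value"|, (p.1, p.2.1))])) PySem.Dict.empty
  let maxValue := (PySem.List.max? values.keys (fun x => x)).getD 0
  let maxPairs := values.getD maxValue []
  -- max(maxPairs) ported as Python's running first-maximum; [] is Python's ValueError (pairs empty), outside Pre_
  match maxPairs with
  | [] => ("", "")
  | h :: t => (t.foldl (fun cur x => if pvEnc4 cur < pvEnc4 x then x else cur) h).2.2.2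

-- ===== PORT B =====
def findMaxRank_py_alt (pairs : List (String × String × List (String × Int))) (leftRankings : List (String × Int)) (rightRankings : List (String × Int)) : String × String :=
  let best := pairs.foldl (fun best p =>
      let leftRank := pvLookD leftRankings p.1
      let rightRank := pvLookD rightRankings p.2.1
      let key := (leftRank * rightRank, leftRank, rightRank, |pvLookD p.2.2 "value"|, (p.1, p.2.1))
      match best with
      | none => some key
      | some b => if pvEnc5 b < pvEnc5 key then some key else some b) none
  match best with
  | some b => b.2.2.2.2
  | none => ("", "")   -- Python's TypeError on empty pairs, outside Pre_

-- ===== PRECONDITION & SPEC =====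
-- Pre_ excludes exactly the inputs where Python A raises: empty pairs (ValueError from max) and
-- pairs whose left/right glyph or "value" key is missing from its dict (KeyError).
def Pre_findMaxRank_py (pairs : List (String × String × List (String × Int))) (leftRankings : List (String × Int)) (rightRankings : List (String × Int)) : Prop :=
  pairs ≠ [] ∧ ∀ p ∈ pairs, (List.lookup p.1 leftRankings).isSome = true ∧ (List.lookup p.2.1 rightRankings).isSome = true ∧ (List.lookup "value" p.2.2).isSome = true
instance (pairs : List (String × String × List (String × Int))) (leftRankings : List (String × Int)) (rightRankings : List (String × Int)) : Decidable (Pre_findMaxRank_py pairs leftRankings rightRankings) := by unfold Pre_findMaxRank_py; infer_instance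
def pvWitness_findMaxRank_py : (List (String × String × List (String × Int))) × (List (String × Int)) × (List (String × Int)) :=
  ([("A", ("H", [("value", 0)]))], ([("A", 4)], [("H", 4)]))

def Spec_findMaxRank_py (pairs : List (String × String × List (String × Int))) (leftRankings : List (String × Int)) (rightRankings : List (String × Int)) (out : String × String) : Prop := out = findMaxRank_py_alt pairs leftRankings rightRankings
instance (pairs : List (String × String × List (String × Int))) (leftRankings : List (String × Int)) (rightRankings : List (String × Int)) (out : String × String) : Decidable (Spec_findMaxRank_py pairs leftRankings rightRankings out) := by unfold Spec_findMaxRank_py; infer_instance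

-- ===== CLAIM (what is proved, stated in full; the proofs are below) =====
def Claim_equal_findMaxRank_py : Prop := ∀ (pairs : List (String × String × List (String × Int))) (leftRankings : List (String × Int)) (rightRankings : List (String × Int)), Dom_findMaxRank_py pairs leftRankings rightRankings → Pre_findMaxRank_py pairs leftRankings rightRankings → Spec_findMaxRank_py pairs leftRankings rightRankings (findMaxRank_py pairs leftRankings rightRankings)

-- ===== LEMMAS AND PROOFS =====

-- the composite key both programs compute for one pair
def pvKeyOf (leftRankings rightRankings : List (String × Int)) (p : String × String × List (String × Int)) : Int × Int × Int × Int × (String × String) :=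
  (pvLookD leftRankings p.1 * pvLookD rightRankings p.2.1,
   pvLookD leftRankings p.1, pvLookD rightRankings p.2.1,
   |pvLookD p.2.2 "value"|, (p.1, p.2.1))

-- generic running first-maximum: result is the old acc or a list element, and an upper bound
theorem pv_foldmax_spec {α β : Type} [LinearOrder β] (e : α → β) (t : List α) :
    ∀ a : α, (t.foldl (fun c x => if e c < e x then x else c) a = a ∨ t.foldl (fun c x => if e c < e x then x else c) a ∈ t)
      ∧ e a ≤ e (t.foldl (fun c x => if e c < e x then x else c) a)
      ∧ ∀ x ∈ t, e x ≤ e (t.foldl (fun c x => if e c < e x then x else c) a) := by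
  induction t with
  | nil => intro a; simp
  | cons y ys ih =>
    intro a
    simp only [List.foldl_cons, List.mem_cons]
    obtain ⟨hmem, hacc, hub⟩ := ih (if e a < e y then y else a)
    refine ⟨?_, ?_, ?_⟩
    · rcases hmem with h | h
      · rw [h]; split_ifs with hy
        · exact Or.inr (Or.inl rfl)
        · exact Or.inl rfl
      · exact Or.inr (Or.inr h)
    · refine le_trans ?_ hacc
      split_ifs with hy
      · exact le_of_lt hy
      · exact le_rfl
    · intro x hx
      rcases hx with rfl | hx
      · refine le_trans ?_ hacc
        split_ifs with hy
        · exact le_rfl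
        · exact le_of_not_gt hy
      · exact hub x hx

-- B's Option fold is the plain running maximum once seeded
theorem pv_bestFold_some (t : List (Int × Int × Int × Int × (String × String))) :
    ∀ a, t.foldl (fun b k => match b with
        | none => some k
        | some b => if pvEnc5 b < pvEnc5 k then some k else some b) (some a)
      = some (t.foldl (fun c x => if pvEnc5 c < pvEnc5 x then x else c) a) := by
  induction t with
  | nil => intro a; rfl
  | cons y ys ih =>
    intro a
    simp only [List.foldl_cons]
    by_cases h : pvEnc5 a < pvEnc5 y <;> simp only [h, if_true, if_false] <;> exact ih _

-- keys of A's grouping fold: the distinct products, in first-occurrence order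
theorem pv_keys_bucketFold (ks : List (Int × Int × Int × Int × (String × String))) :
    ∀ d : PySem.Dict Int (List (Int × Int × Int × (String × String))),
      (ks.foldl (fun d p => d.modify p.1 [] fun x => x ++ [p.2]) d).keys = PySem.Set.update d.keys (ks.map (·.1)) := by
  induction ks with
  | nil => intro d; simp [PySem.Set.update]
  | cons k ks ih =>
    intro d
    simp only [List.foldl_cons, List.map_cons, PySem.Set.update_cons]
    rw [ih]
    congr 1
    rw [PySem.Dict.keys_modify, PySem.Set.add_eq_ite]
    by_cases h : k.1 ∈ d.keys
    · rw [PySem.Dict.keys_insert_of_contains _ _ ((PySem.Dict.contains_iff_mem_keys d k.1).mpr h)]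
      simp [h]
    · rw [PySem.Dict.keys_insert_of_not_contains _ _ (by
        rw [← Bool.not_eq_true]
        exact fun hc => h ((PySem.Dict.contains_iff_mem_keys d k.1).mp hc))]
      simp [h]

theorem pvEnc5_inj : Function.Injective pvEnc5 := by
  intro a b h
  obtain ⟨a1, a2, a3, a4, a5, a6⟩ := a
  obtain ⟨b1, b2, b3, b4, b5, b6⟩ := b
  simp only [pvEnc5, pvEnc4, pvEnc2, toLex_inj, Prod.mk.injEq] at h
  obtain ⟨h1, h2, h3, h4, h5, h6⟩ := h
  simp_all [String.toList_inj]

-- A's fold over pairs is the pure grouping fold over the mapped composite keys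
theorem pv_foldA (pairs : List (String × String × List (String × Int))) (leftRankings rightRankings : List (String × Int)) :
    pairs.foldl (fun d p =>
      let leftRank := pvLookD leftRankings p.1
      let rightRank := pvLookD rightRankings p.2.1
      let value := leftRank * rightRank
      d.modify value [] (fun l => l ++ [(leftRank, rightRank, |pvLookD p.2.2 "value"|, (p.1, p.2.1))])) PySem.Dict.empty
    = (pairs.map (pvKeyOf leftRankings rightRankings)).foldl (fun d p => d.modify p.1 [] fun x => x ++ [p.2]) PySem.Dict.empty := by
  rw [List.foldl_map]; rfl

-- B's fold over pairs is the pure best-so-far fold over the mapped composite keys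
theorem pv_foldB (pairs : List (String × String × List (String × Int))) (leftRankings rightRankings : List (String × Int)) :
    pairs.foldl (fun best p =>
      let leftRank := pvLookD leftRankings p.1
      let rightRank := pvLookD rightRankings p.2.1
      let key := (leftRank * rightRank, leftRank, rightRank, |pvLookD p.2.2 "value"|, (p.1, p.2.1))
      match best with
      | none => some key
      | some b => if pvEnc5 b < pvEnc5 key then some key else some b) none
    = (pairs.map (pvKeyOf leftRankings rightRankings)).foldl (fun b k =>
      match b with
      | none => some k
      | some b => if pvEnc5 b < pvEnc5 k then some k else some b) none := by
  rw [List.foldl_map]; rfl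

-- B's fold on a nonempty key list, from the start
theorem pv_bestFold_none (k0 : Int × Int × Int × Int × (String × String)) (kt : List (Int × Int × Int × Int × (String × String))) :
    (k0 :: kt).foldl (fun b k => match b with
      | none => some k
      | some b => if pvEnc5 b < pvEnc5 k then some k else some b) none
    = some (kt.foldl (fun c x => if pvEnc5 c < pvEnc5 x then x else c) k0) := by
  rw [List.foldl_cons]; exact pv_bestFold_some kt k0

-- the heart: on a nonempty key list, A's two-stage max (max product over the grouping dict's keys,
-- then running max inside the winning bucket) returns the pair of the single-pass lexicographic maximum
theorem pv_core (k0 : Int × Int × Int × Int × (String × String)) (kt : List (Int × Int × Int × Int × (String × String))) :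
    (match ((k0 :: kt).foldl (fun d p => d.modify p.1 [] fun x => x ++ [p.2]) PySem.Dict.empty).getD
        ((PySem.List.max? ((k0 :: kt).foldl (fun d p => d.modify p.1 [] fun x => x ++ [p.2]) PySem.Dict.empty).keys (fun x => x)).getD 0) [] with
      | [] => (("", "") : String × String)
      | h :: t => (t.foldl (fun cur x => if pvEnc4 cur < pvEnc4 x then x else cur) h).2.2.2)
    = (kt.foldl (fun c x => if pvEnc5 c < pvEnc5 x then x else c) k0).2.2.2.2 := by
  set ks := k0 :: kt with hks
  set d := ks.foldl (fun d p => d.modify p.1 [] fun x => x ++ [p.2]) PySem.Dict.empty with hd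
  have hkeys : d.keys = PySem.Set.ofList (ks.map (·.1)) := by
    rw [hd, pv_keys_bucketFold, PySem.Dict.keys_empty, PySem.Set.update_nil_left]
  have hkeysne : d.keys ≠ [] := by
    rw [hkeys, hks, List.map_cons, PySem.Set.ofList_cons]; simp
  obtain ⟨m, hm⟩ : ∃ m, PySem.List.max? d.keys (fun x => x) = some m := by
    cases h : PySem.List.max? d.keys (fun x => x) with
    | none => exact absurd ((PySem.List.max?_eq_none_iff _ _).mp h) hkeysne
    | some m => exact ⟨m, rfl⟩
  have hmmem : m ∈ ks.map (·.1) :=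
    (PySem.Set.mem_ofList _ _).mp (hkeys ▸ PySem.List.max?_mem hm)
  have hmub : ∀ k ∈ ks, k.1 ≤ m := fun k hk =>
    PySem.List.max?_isMax hm k.1 (by rw [hkeys, PySem.Set.mem_ofList]; exact List.mem_map_of_mem hk)
  have hbucket : d.getD m [] = (ks.filter (fun p => p.1 == m)).map (·.2) := by
    rw [hd, PySem.Dict.getD_foldl_modify_append]
    simp [PySem.Dict.getD_empty]
  have hbne : (ks.filter (fun p => p.1 == m)).map (·.2) ≠ [] := by
    obtain ⟨j, hj, hj1⟩ := List.exists_of_mem_map hmmem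
    have : j ∈ ks.filter (fun p => p.1 == m) := List.mem_filter.mpr ⟨hj, by simp [hj1]⟩
    simp only [ne_eq, List.map_eq_nil_iff, List.filter_eq_nil_iff]
    exact fun hnone => hnone j hj (by simp [hj1])
  rw [hm, Option.getD_some, hbucket]
  cases hb : (ks.filter (fun p => p.1 == m)).map (·.2) with
  | nil => exact absurd hb hbne
  | cons h t =>
    -- the two running maxima
    obtain ⟨hr4mem, hr4seed, hr4ub⟩ := pv_foldmax_spec pvEnc4 t h
    obtain ⟨hr5mem, hr5seed, hr5ub⟩ := pv_foldmax_spec pvEnc5 kt k0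
    set r4 := t.foldl (fun c x => if pvEnc4 c < pvEnc4 x then x else c) h with hr4
    set r5 := kt.foldl (fun c x => if pvEnc5 c < pvEnc5 x then x else c) k0 with hr5
    have hr5ks : r5 ∈ ks := by
      rcases hr5mem with h5 | h5
      · rw [h5]; exact List.mem_cons_self
      · exact List.mem_cons_of_mem _ h5
    have hr5ub' : ∀ x ∈ ks, pvEnc5 x ≤ pvEnc5 r5 := by
      intro x hx
      rcases List.mem_cons.mp hx with rfl | hx
      · exact hr5seed
      · exact hr5ub x hx
    have hr4bucket : r4 ∈ (ks.filter (fun p => p.1 == m)).map (·.2) := by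
      rw [hb]
      rcases hr4mem with h4 | h4
      · rw [h4]; exact List.mem_cons_self
      · exact List.mem_cons_of_mem _ h4
    have hr4ub' : ∀ x ∈ (ks.filter (fun p => p.1 == m)).map (·.2), pvEnc4 x ≤ pvEnc4 r4 := by
      intro x hx
      rw [hb] at hx
      rcases List.mem_cons.mp hx with rfl | hx
      · exact hr4seed
      · exact hr4ub x hx
    -- (m, r4) is an element of ks …
    obtain ⟨q, hq, hq2⟩ := List.exists_of_mem_map hr4bucket
    have hq1 : q.1 = m := by
      have := (List.mem_filter.mp hq).2; simpa using this
    have hmr4ks : ((m, r4) : Int × Int × Int × Int × (String × String)) ∈ ks := by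
      have : q = (m, r4) := by
        obtain ⟨q1, q2⟩ := q
        simp only [Prod.mk.injEq]
        exact ⟨hq1, hq2⟩
      rw [← this]
      exact (List.mem_filter.mp hq).1
    -- … and an upper bound for pvEnc5 on ks
    have hmr4ub : ∀ k ∈ ks, pvEnc5 k ≤ pvEnc5 ((m, r4) : Int × Int × Int × Int × (String × String)) := by
      intro k hk
      have hk1 : k.1 ≤ m := hmub k hk
      rcases lt_or_eq_of_le hk1 with hlt | heq
      · simp only [pvEnc5]
        rw [Prod.Lex.le_iff]
        exact Or.inl hlt
      · simp only [pvEnc5]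
        rw [Prod.Lex.le_iff]
        refine Or.inr ⟨heq, ?_⟩
        have hkfil : k ∈ ks.filter (fun p => p.1 == m) := List.mem_filter.mpr ⟨hk, by simp [heq]⟩
        exact hr4ub' k.2 (List.mem_map_of_mem hkfil)
    -- antisymmetry forces the two results equal
    have : r5 = ((m, r4) : Int × Int × Int × Int × (String × String)) :=
      pvEnc5_inj (le_antisymm (hmr4ub r5 hr5ks) (hr5ub' _ hmr4ks))
    rw [this]

-- ===== VERDICT (by name: the statement is the Claim_ definition above) =====
theorem findMaxRank_py_spec : Claim_equal_findMaxRank_py := by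
  intro pairs leftRankings rightRankings _ hpre
  obtain ⟨hne, -⟩ := hpre
  obtain ⟨p0, ps, rfl⟩ : ∃ p0 ps, pairs = p0 :: ps := by
    cases pairs with
    | nil => exact absurd rfl hne
    | cons p0 ps => exact ⟨p0, ps, rfl⟩
  unfold Spec_findMaxRank_py
  simp only [findMaxRank_py, findMaxRank_py_alt, pv_foldA, pv_foldB]
  rw [List.map_cons, pv_bestFold_none]
  exact pv_core _ _
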